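-- pv_equiv track=rewrite | github.com/seong-wooo/Algorithm_Study | 프로그래머스/2/131127. 할인 행사/할인 행사.py | solution
-- ===== SOURCE A (Python) =====
-- from collections import defaultdict
--
-- def solution(want, number, discount):
--     w = defaultdict(int)
--     for i in range(len(want)):
--         w[want[i]] += number[i]
--
--
--     d = defaultdict(int)
--     for i in range(10):
--         d[discount[i]] += 1
--
--     result = contains(w, d)
--     for i in range(1, len(discount) - 9):
--
--         d[discount[i - 1]] -= 1
--         d[discount[i + 9]] += 1
--         if d[discount[i - 1]] == 0:
--             d.pop(discount[i -1])
--         result += contains(w, d)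
--
--     return result
--
-- def contains(w, d):
--     for v in w:
--         if not d[v] or w[v] > d[v]:
--             return 0
--     return 1
-- ===== SOURCE B (Python) =====
-- def solution(want, number, discount):
--     # threshold per wanted item: the summed quantity, but at least 1 (the item must appear)
--     thr = {}
--     for i, item in enumerate(want):
--         thr[item] = thr.get(item, 0) + number[i]
--     thr = {item: max(q, 1) for item, q in thr.items()}
--     target = len(thr)
--     cnt = {item: 0 for item in thr}
--     n_sat = 0
--     for day in range(10):  # the first 10-day window
--         item = discount[day]
--         if item in cnt:
--             cnt[item] += 1
--             if cnt[item] == thr[item]: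
--                 n_sat += 1
--     result = int(n_sat == target)
--     for start in range(1, len(discount) - 9):
--         out_item = discount[start - 1]
--         if out_item in cnt:
--             if cnt[out_item] == thr[out_item]:
--                 n_sat -= 1
--             cnt[out_item] -= 1
--         in_item = discount[start + 9]
--         if in_item in cnt:
--             cnt[in_item] += 1
--             if cnt[in_item] == thr[in_item]:
--                 n_sat += 1
--         result += int(n_sat == target)
--     return result
-- ===== Notes on version B (the rewrite author's own statement) =====
-- stated objective: alternative
-- what changed: B keeps counts only for the wanted items plus a single satisfied-items counter updated at the two window edges (O(1) per window), instead of A's full counter of every discount item (with pops of zero entries) that is rescanned against the whole want dict for every window by an early-return contains helper.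
import Mathlib
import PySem

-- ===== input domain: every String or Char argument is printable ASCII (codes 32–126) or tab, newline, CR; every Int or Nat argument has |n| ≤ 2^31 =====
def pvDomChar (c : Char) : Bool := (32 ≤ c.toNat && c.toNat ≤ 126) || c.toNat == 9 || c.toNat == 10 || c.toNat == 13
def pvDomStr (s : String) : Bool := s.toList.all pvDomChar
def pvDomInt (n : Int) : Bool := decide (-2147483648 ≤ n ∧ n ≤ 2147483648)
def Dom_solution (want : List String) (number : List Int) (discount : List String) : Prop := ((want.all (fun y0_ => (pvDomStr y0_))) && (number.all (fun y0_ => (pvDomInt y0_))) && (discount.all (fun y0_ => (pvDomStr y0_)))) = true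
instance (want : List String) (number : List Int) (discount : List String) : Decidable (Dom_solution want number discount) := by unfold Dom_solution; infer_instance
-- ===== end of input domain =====

-- B keeps counts only for the wanted items plus one satisfied-items counter updated at the two
-- window edges, instead of A's full counter of every item (with pops of zero entries) rechecked
-- against the whole want dict for every window by an early-return helper.

-- ===== PORT A =====
-- contains(w, d): early-return loop over w's keys
def containsAux (w d : PySem.Dict String Int) : List String → Int
  | [] => 1
  | v :: rest =>
    if d.getD v 0 == 0 || w.getD v 0 > d.getD v 0 then 0
    else containsAux w d rest

def containsPy (w d : PySem.Dict String Int) : Int := containsAux w d (PySem.Dict.keys w)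

def solution (want : List String) (number : List Int) (discount : List String) : Int :=
  -- w[want[i]] += number[i]
  let w := (PySem.List.pyRange 0 (want.length : Int) 1).foldl
    (fun d i => d.insert (PySem.List.pyGetD want i "")
        (d.getD (PySem.List.pyGetD want i "") 0 + PySem.List.pyGetD number i 0))
    PySem.Dict.empty
  -- d[discount[i]] += 1 for i in range(10)
  let d0 := (PySem.List.pyRange 0 10 1).foldl
    (fun d i => d.insert (PySem.List.pyGetD discount i "")
        (d.getD (PySem.List.pyGetD discount i "") 0 + 1))
    PySem.Dict.empty
  -- sliding loop, state (d, result)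
  let res := (PySem.List.pyRange 1 ((discount.length : Int) - 9) 1).foldl
    (fun (st : PySem.Dict String Int × Int) i =>
      let prev := PySem.List.pyGetD discount (i - 1) ""
      let d1 := st.1.insert prev (st.1.getD prev 0 - 1)
      let nxt := PySem.List.pyGetD discount (i + 9) ""
      let d2 := d1.insert nxt (d1.getD nxt 0 + 1)
      let d3 := if d2.getD prev 0 == 0 then d2.erase prev else d2
      (d3, st.2 + containsPy w d3))
    (d0, containsPy w d0)
  res.2

-- ===== PORT B =====
-- body of B's first loop: count one day's item into the window, bumping n_sat on a threshold hit
def bCount (thr : PySem.Dict String Int) (st : PySem.Dict String Int × Int) (item : String) :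
    PySem.Dict String Int × Int :=
  if st.1.contains item then
    (st.1.insert item (st.1.getD item 0 + 1),
     if st.1.getD item 0 + 1 == thr.getD item 0 then st.2 + 1 else st.2)
  else st

-- body of B's sliding loop: retire day start-1, admit day start+9, count the window if satisfied
def bStep (thr : PySem.Dict String Int) (discount : List String)
    (st : PySem.Dict String Int × Int × Int) (start : Int) :
    PySem.Dict String Int × Int × Int :=
  let outI := PySem.List.pyGetD discount (start - 1) ""
  let st1 : PySem.Dict String Int × Int :=
    if st.1.contains outI then
      (st.1.insert outI (st.1.getD outI 0 - 1),
       if st.1.getD outI 0 == thr.getD outI 0 then st.2.1 - 1 else st.2.1)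
    else (st.1, st.2.1)
  let inI := PySem.List.pyGetD discount (start + 9) ""
  let st2 : PySem.Dict String Int × Int :=
    if st1.1.contains inI then
      (st1.1.insert inI (st1.1.getD inI 0 + 1),
       if st1.1.getD inI 0 + 1 == thr.getD inI 0 then st1.2 + 1 else st1.2)
    else st1
  (st2.1, st2.2, st.2.2 + (if st2.2 == (thr.size : Int) then (1 : Int) else 0))

def solution_alt (want : List String) (number : List Int) (discount : List String) : Int :=
  -- thr[item] = thr.get(item, 0) + number[i]
  let thr0 := (PySem.List.enumerate want 0).foldl
    (fun d p => d.insert p.2 (d.getD p.2 0 + PySem.List.pyGetD number p.1 0)) PySem.Dict.empty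
  -- thr = {item: max(q, 1) for item, q in thr.items()}
  let thr := thr0.items.foldl (fun d p => d.insert p.1 (max p.2 1)) PySem.Dict.empty
  let target : Int := (thr.size : Int)
  -- cnt = {item: 0 for item in thr}
  let cnt0 := thr.keys.foldl (fun d k => d.insert k 0) PySem.Dict.empty
  -- the first 10-day window
  let st0 := (PySem.List.pyRange 0 10 1).foldl
    (fun st day => bCount thr st (PySem.List.pyGetD discount day "")) (cnt0, 0)
  let res0 : Int := if st0.2 == target then 1 else 0
  ((PySem.List.pyRange 1 ((discount.length : Int) - 9) 1).foldl
      (bStep thr discount) (st0.1, st0.2, res0)).2.2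

-- ===== PRECONDITION & SPEC =====
-- Pre_ excludes exactly the inputs on which A raises IndexError (fewer than 10 discount days, or
-- fewer numbers than wanted items); B raises there too.
def Pre_solution (want : List String) (number : List Int) (discount : List String) : Prop :=
  want.length ≤ number.length ∧ 10 ≤ discount.length
instance (want : List String) (number : List Int) (discount : List String) : Decidable (Pre_solution want number discount) := by unfold Pre_solution; infer_instance

def pvWitness_solution : List String × List Int × List String :=
  (["a", "b"], [2, 1], ["a", "a", "b", "c", "a", "b", "a", "a", "b", "c", "a"])

def Spec_solution (want : List String) (number : List Int) (discount : List String) (out : Int) : Prop := out = solution_alt want number discount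
instance (want : List String) (number : List Int) (discount : List String) (out : Int) : Decidable (Spec_solution want number discount out) := by unfold Spec_solution; infer_instance

-- ===== CLAIM (what is proved, stated in full; the proofs are below) =====
def Claim_equal_solution : Prop := ∀ (want : List String) (number : List Int) (discount : List String), Dom_solution want number discount → Pre_solution want number discount → Spec_solution want number discount (solution want number discount)

-- ===== LEMMAS AND PROOFS =====

-- count of elements of discount in the window of 10 starting at m
def wcnt (discount : List String) (m : Nat) (k : String) : Int :=
  (((discount.drop m).take 10).count k : Int)

theorem wcnt_nonneg (discount : List String) (m : Nat) (k : String) : 0 ≤ wcnt discount m k := by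
  simp [wcnt]

theorem wcnt_succ (discount : List String) (m : Nat) (h : m + 11 ≤ discount.length) (k : String) :
    wcnt discount (m + 1) k =
      wcnt discount m k - (if discount[m]'(by omega) = k then 1 else 0)
        + (if discount[m + 10]'(by omega) = k then 1 else 0) := by
  unfold wcnt
  have h1 : (discount.drop m).take 10 = discount[m]'(by omega) :: (discount.drop (m+1)).take 9 := by
    rw [List.drop_eq_getElem_cons (by omega)]
    rfl
  have h2 : (discount.drop (m+1)).take 10 = (discount.drop (m+1)).take 9 ++ [discount[m + 10]'(by omega)] := by
    have h10 : (discount.drop (m+1)).take 10 = (discount.drop (m+1)).take 9 ++ ((discount.drop (m+1))[9]?).toList :=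
      List.take_add_one
    have : (discount.drop (m+1))[9]? = some (discount[m + 10]'(by omega)) := by
      rw [List.getElem?_drop]
      simp [List.getElem?_eq_getElem (by omega : m + 1 + 9 < discount.length)]
    rw [h10, this]
    rfl
  rw [h1, h2]
  simp [List.count_cons, List.count_append, beq_iff_eq]

-- getD after erase (not in the PySem lemma book)
theorem getD_erase_of_ne (d : PySem.Dict String Int) (k k' : String) (h : k' ≠ k) :
    (d.erase k).getD k' 0 = d.getD k' 0 := by
  simp [PySem.Dict.getD_eq_get?_getD, PySem.Dict.erase, PySem.Dict.get?]
  induction d.items with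
  | nil => rfl
  | cons p rest ih =>
    by_cases hp : p.1 = k
    · simp [hp, Ne.symm h, ih]
    · by_cases hp' : p.1 = k' <;> simp [hp, hp', h, ih]

theorem getD_erase_self (d : PySem.Dict String Int) (k : String) : (d.erase k).getD k 0 = 0 := by
  simp [PySem.Dict.getD_eq_get?_getD, PySem.Dict.erase, PySem.Dict.get?]
  induction d.items with
  | nil => rfl
  | cons p rest ih => simpa using ih

theorem containsAux_eq_all (w d : PySem.Dict String Int)
    (hpos : ∀ k, 0 ≤ d.getD k 0) (ks : List String) :
    containsAux w d ks =
      if ks.all (fun k => decide (d.getD k 0 ≥ max (w.getD k 0) 1)) then 1 else 0 := by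
  induction ks with
  | nil => rfl
  | cons v rest ih =>
    have hv := hpos v
    simp only [containsAux, List.all_cons]
    by_cases h0 : d.getD v 0 = 0
    · have hne : ¬ ((0 : Int) ≥ max (w.getD v 0) 1) := by omega
      simp [h0, hne]
    · by_cases hgt : w.getD v 0 > d.getD v 0
      · have hne : ¬ (d.getD v 0 ≥ max (w.getD v 0) 1) := by omega
        simp [hgt, hne]
      · have hge : d.getD v 0 ≥ max (w.getD v 0) 1 := by omega
        simp [h0, hgt, hge, ih]

theorem containsPy_eq_all (w d : PySem.Dict String Int) (hnd : w.keys.Nodup)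
    (hpos : ∀ k, 0 ≤ d.getD k 0) :
    containsPy w d =
      if (PySem.Dict.items w).all (fun p => decide (d.getD p.1 0 ≥ max p.2 1)) then 1 else 0 := by
  rw [containsPy, containsAux_eq_all w d hpos]
  rw [PySem.Dict.items_eq_map_keys w hnd 0, List.all_map]
  rfl

-- the two ways of building the want-counter (A: index loop, B: enumerate) are the same fold
theorem need_eq (want : List String) (number : List Int) :
    (PySem.List.enumerate want 0).foldl
      (fun d (p : Int × String) => d.insert p.2 (d.getD p.2 0 + PySem.List.pyGetD number p.1 0))
      PySem.Dict.empty
    = (PySem.List.pyRange 0 (want.length : Int) 1).foldl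
      (fun d i => d.insert (PySem.List.pyGetD want i "")
          (d.getD (PySem.List.pyGetD want i "") 0 + PySem.List.pyGetD number i 0))
      PySem.Dict.empty := by
  rw [PySem.List.enumerate_eq_map_pyRange want ""]
  rw [List.foldl_map]
  simp [PySem.List.len_eq]

-- the first ten lookups of the discount list, as a list
theorem map_pyRange10 (discount : List String) (h : 10 ≤ discount.length) :
    (PySem.List.pyRange 0 10 1).map (fun i => PySem.List.pyGetD discount i "")
      = discount.take 10 := by
  have hlen : ((discount.take 10).length : Int) = 10 := by simp; omega
  have := PySem.List.map_pyGetD_pyRange_zero (discount.take 10) ""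
  rw [PySem.List.len_eq, hlen] at this
  rw [← this]
  apply List.map_congr_left
  intro i hi
  rw [PySem.List.mem_pyRange_one] at hi
  rw [PySem.List.pyGetD_eq_getElem _ _ hi.1 (by omega),
      PySem.List.pyGetD_eq_getElem _ _ hi.1 (by simp; omega)]
  simp

-- initial A dict d0 getD is the window-0 count
theorem d0_getD (discount : List String) (h : 10 ≤ discount.length) (k : String) :
    ((PySem.List.pyRange 0 10 1).foldl
      (fun d i => d.insert (PySem.List.pyGetD discount i "")
          (d.getD (PySem.List.pyGetD discount i "") 0 + 1))
      PySem.Dict.empty).getD k 0 = wcnt discount 0 k := by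
  have hc := PySem.Dict.getD_foldl_insert_add_one
    ((PySem.List.pyRange 0 10 1).map (fun i => PySem.List.pyGetD discount i ""))
    PySem.Dict.empty k
  rw [List.foldl_map, map_pyRange10 discount h] at hc
  rw [hc]
  simp [wcnt]

-- number of wanted items whose threshold the current counts meet
def satLen (items : List (String × Int)) (g : String → Int) : Int :=
  (items.countP (fun p => decide (g p.1 ≥ p.2)) : Int)

theorem satLen_congr (items : List (String × Int)) (g g' : String → Int)
    (h : ∀ p ∈ items, g' p.1 = g p.1) : satLen items g' = satLen items g := by
  unfold satLen
  congr 1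
  exact List.countP_congr (fun p hp => by rw [h p hp])

theorem satLen_update (items : List (String × Int)) (hnd : (items.map Prod.fst).Nodup)
    (x : String) (t : Int) (hmem : (x, t) ∈ items) (g g' : String → Int)
    (hagree : ∀ k, k ≠ x → g' k = g k) :
    satLen items g' = satLen items g + (if g' x ≥ t then 1 else 0) - (if g x ≥ t then 1 else 0) := by
  induction items with
  | nil => simp at hmem
  | cons p rest ih =>
    simp only [List.map_cons, List.nodup_cons] at hnd
    rcases List.mem_cons.mp hmem with hp | hr
    · subst hp
      have hrest : satLen rest g' = satLen rest g := by
        refine satLen_congr rest g g' (fun q hq => hagree q.1 (fun e => hnd.1 ?_))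
        have : q.1 ∈ rest.map Prod.fst := List.mem_map_of_mem hq
        rwa [e] at this
      unfold satLen at hrest ⊢
      simp only [List.countP_cons]
      split_ifs with h1 h2 h2 <;> simp_all
    · have hpx : p.1 ≠ x := by
        intro e
        exact hnd.1 (e ▸ (List.mem_map_of_mem hr : (x,t).1 ∈ rest.map Prod.fst))
      have := ih hnd.2 hr
      unfold satLen at this ⊢
      simp only [List.countP_cons, hagree p.1 hpx]
      push_cast at this ⊢
      omega

-- 'every wanted item satisfied' as B counts it = 'every wanted item satisfied' as A checks it
theorem sat_eq_target (need thr : PySem.Dict String Int)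
    (hitems : thr.items = need.items.map (fun p => (p.1, max p.2 1))) (g : String → Int) :
    (satLen thr.items g == (thr.size : Int))
      = need.items.all (fun p => decide (g p.1 ≥ max p.2 1)) := by
  unfold satLen
  rw [PySem.Dict.size, hitems, List.countP_map, List.length_map]
  by_cases h : ∀ p ∈ need.items, (fun p => decide (g p.1 ≥ max p.2 1)) p = true
  · have hc : need.items.countP ((fun p => decide (g p.1 ≥ p.2)) ∘ (fun p => (p.1, max p.2 1)))
        = need.items.length := by
      rw [List.countP_eq_length]
      intro a ha
      simpa using h a ha
    rw [hc]
    have hall : need.items.all (fun p => decide (g p.1 ≥ max p.2 1)) = true :=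
      List.all_eq_true.mpr h
    rw [hall]
    simp
  · have hc : need.items.countP ((fun p => decide (g p.1 ≥ p.2)) ∘ (fun p => (p.1, max p.2 1)))
        ≠ need.items.length := by
      intro e
      exact h (fun a ha => by simpa using (List.countP_eq_length.mp e) a ha)
    have hall : need.items.all (fun p => decide (g p.1 ≥ max p.2 1)) = false := by
      rw [List.all_eq_false]
      push_neg at h
      obtain ⟨a, ha, hv⟩ := h
      exact ⟨a, ha, by simpa using hv⟩
    rw [hall]
    rw [beq_eq_false_iff_ne]
    intro e
    exact hc (by exact_mod_cast e)

-- B's first loop: counting a list of items into the window keeps the invariants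
theorem loopB_init (thr : PySem.Dict String Int) (thrnd : thr.keys.Nodup) (xs : List String) :
    ∀ (cnt : PySem.Dict String Int) (n : Int) (g : String → Int),
    (∀ k, cnt.contains k = thr.contains k) →
    (∀ k ∈ thr.keys, cnt.getD k 0 = g k) →
    n = satLen thr.items g →
    (∀ k, (xs.foldl (bCount thr) (cnt, n)).1.contains k = thr.contains k)
    ∧ (∀ k ∈ thr.keys, (xs.foldl (bCount thr) (cnt, n)).1.getD k 0 = g k + (xs.count k : Int))
    ∧ (xs.foldl (bCount thr) (cnt, n)).2 = satLen thr.items (fun k => g k + (xs.count k : Int)) := by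
  induction xs with
  | nil =>
    intro cnt n g hc hg hn
    refine ⟨hc, fun k hk => by simpa using hg k hk, ?_⟩
    rw [hn]
    exact (satLen_congr _ _ _ (fun p _ => by simp)).symm
  | cons x rest ih =>
    intro cnt n g hc hg hn
    simp only [List.foldl_cons]
    by_cases hx : thr.contains x = true
    · have hmemx : x ∈ thr.keys := (PySem.Dict.contains_iff_mem_keys _ _).mp hx
      have hgx : cnt.getD x 0 = g x := hg x hmemx
      have hmemi : (x, thr.getD x 0) ∈ thr.items := by
        rw [PySem.Dict.items_eq_map_keys thr thrnd 0]
        exact List.mem_map_of_mem hmemx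
      have hbc : bCount thr (cnt, n) x
          = (cnt.insert x (cnt.getD x 0 + 1),
             if cnt.getD x 0 + 1 == thr.getD x 0 then n + 1 else n) := by
        simp [bCount, hc x, hx]
      rw [hbc]
      set g1 : String → Int := fun k => if k = x then g x + 1 else g k with hg1
      have hstep := ih (cnt.insert x (cnt.getD x 0 + 1))
        (if cnt.getD x 0 + 1 == thr.getD x 0 then n + 1 else n) g1
        (fun k => by
          rw [PySem.Dict.contains_insert]
          by_cases hk : k = x
          · simp [hk, hx]
          · simp [hk, hc k, (by exact fun e => hk (by simpa using e) : ¬ (k == x) = true)])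
        (fun k hk => by
          rw [PySem.Dict.getD_insert]
          by_cases hkx : k = x
          · simp [hkx, hg1, hgx]
          · simp [hkx, hg1, hg k hk])
        (by
          have hupd := satLen_update thr.items (by rwa [PySem.Dict.keys] at thrnd)
            x (thr.getD x 0) hmemi g g1 (fun k hk => by simp [hg1, hk])
          rw [hn, hupd, hgx]
          have hgx1 : g1 x = g x + 1 := by simp [hg1]
          rw [hgx1]
          by_cases he : g x + 1 = thr.getD x 0
          · rw [if_pos (beq_iff_eq.mpr he)]
            split_ifs <;> omega
          · rw [if_neg (by simpa using he)]
            split_ifs <;> omega)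
      refine ⟨hstep.1, fun k hk => ?_, ?_⟩
      · rw [hstep.2.1 k hk]
        by_cases hkx : k = x
        · simp [hkx, hg1, List.count_cons]
          push_cast
          ring
        · simp [hkx, hg1, List.count_cons, Ne.symm hkx, (by exact fun e => hkx (by simpa using e) : ¬ (k == x) = true)]
      · rw [hstep.2.2]
        refine satLen_congr _ _ _ (fun p hp => ?_)
        by_cases hpx : p.1 = x
        · simp [hpx, hg1, List.count_cons]
          push_cast
          ring
        · simp [hpx, hg1, List.count_cons, Ne.symm hpx, (by exact fun e => hpx (by simpa using e) : ¬ (p.1 == x) = true)]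
    · have hnx : x ∉ thr.keys := fun hm => hx ((PySem.Dict.contains_iff_mem_keys _ _).mpr hm)
      have hbc : bCount thr (cnt, n) x = (cnt, n) := by
        simp [bCount, hc x, hx]
      rw [hbc]
      have hstep := ih cnt n g hc hg hn
      refine ⟨hstep.1, fun k hk => ?_, ?_⟩
      · rw [hstep.2.1 k hk]
        have hkx : k ≠ x := fun e => hnx (e ▸ hk)
        simp [List.count_cons, Ne.symm hkx, (by exact fun e => hkx (by simpa using e) : ¬ (k == x) = true)]
      · rw [hstep.2.2]
        refine satLen_congr _ _ _ (fun p hp => ?_)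
        have hpx : p.1 ≠ x := by
          intro e
          have : p.1 ∈ thr.keys := by
            rw [PySem.Dict.keys]
            exact List.mem_map_of_mem hp
          exact hnx (e ▸ this)
        simp [List.count_cons, Ne.symm hpx, (by exact fun e => hpx (by simpa using e) : ¬ (p.1 == x) = true)]

-- B's sliding loop accumulates exactly the per-window hits
theorem loopB_main (need thr : PySem.Dict String Int) (thrnd : thr.keys.Nodup)
    (hitems : thr.items = need.items.map (fun p => (p.1, max p.2 1)))
    (discount : List String) (_hL : 10 ≤ discount.length) :
    ∀ (n : Nat) (j : Int) (cnt : PySem.Dict String Int) (nsat res : Int),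
      1 ≤ j → j = (discount.length : Int) - 9 - n →
      (∀ k, cnt.contains k = thr.contains k) →
      (∀ k ∈ thr.keys, cnt.getD k 0 = wcnt discount (j - 1).toNat k) →
      nsat = satLen thr.items (fun k => wcnt discount (j - 1).toNat k) →
      ((PySem.List.pyRange j ((discount.length : Int) - 9) 1).foldl
          (bStep thr discount) (cnt, nsat, res)).2.2
      = (PySem.List.pyRange j ((discount.length : Int) - 9) 1).foldl
          (fun r i => if need.items.all (fun p => decide (wcnt discount i.toNat p.1 ≥ max p.2 1))
                      then r + 1 else r) res := by
  intro n
  induction n with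
  | zero =>
    intro j cnt nsat res hj1 hjn hc hg hn
    rw [PySem.List.pyRange_one_eq_nil (by omega)]
    rfl
  | succ n ih =>
    intro j cnt nsat res hj1 hjn hc hg hn
    have hjlt : j < (discount.length : Int) - 9 := by omega
    rw [PySem.List.pyRange_one_cons hjlt]
    simp only [List.foldl_cons]
    set m : Nat := (j - 1).toNat with hm
    have hm11 : m + 11 ≤ discount.length := by omega
    have hprev : PySem.List.pyGetD discount (j - 1) "" = discount[m]'(by omega) := by
      rw [PySem.List.pyGetD_eq_getElem discount "" (by omega) (by omega)]
    have hnxt : PySem.List.pyGetD discount (j + 9) "" = discount[m + 10]'(by omega) := by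
      rw [PySem.List.pyGetD_eq_getElem discount "" (by omega) (by omega)]
      congr 1
      omega
    set out := PySem.List.pyGetD discount (j - 1) "" with houtdef
    set inI := PySem.List.pyGetD discount (j + 9) "" with hindef
    set g1 : String → Int := fun k => if k = out then wcnt discount m out - 1 else wcnt discount m k with hg1
    set g2 : String → Int := fun k => if k = inI then g1 inI + 1 else g1 k with hg2
    set p1 : PySem.Dict String Int × Int :=
      if cnt.contains out then
        (cnt.insert out (cnt.getD out 0 - 1),
         if cnt.getD out 0 == thr.getD out 0 then nsat - 1 else nsat)
      else (cnt, nsat) with hp1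
    set p2 : PySem.Dict String Int × Int :=
      if p1.1.contains inI then
        (p1.1.insert inI (p1.1.getD inI 0 + 1),
         if p1.1.getD inI 0 + 1 == thr.getD inI 0 then p1.2 + 1 else p1.2)
      else p1 with hp2
    have hb : bStep thr discount (cnt, nsat, res) j
        = (p2.1, p2.2, res + (if p2.2 == (thr.size : Int) then 1 else 0)) := rfl
    -- invariants after retiring day j-1
    have hinv1 : (∀ k, p1.1.contains k = thr.contains k)
        ∧ (∀ k ∈ thr.keys, p1.1.getD k 0 = g1 k) ∧ p1.2 = satLen thr.items g1 := by
      by_cases hout : thr.contains out = true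
      · have hmemo : out ∈ thr.keys := (PySem.Dict.contains_iff_mem_keys _ _).mp hout
        have hmemi : (out, thr.getD out 0) ∈ thr.items := by
          rw [PySem.Dict.items_eq_map_keys thr thrnd 0]
          exact List.mem_map_of_mem hmemo
        have hgo : cnt.getD out 0 = wcnt discount m out := hg out hmemo
        rw [hp1, hc out, if_pos hout]
        refine ⟨fun k => ?_, fun k hk => ?_, ?_⟩
        · rw [PySem.Dict.contains_insert]
          by_cases hk : k = out
          · simp [hk, hout]
          · simp [hk, hc k, (by exact fun e => hk (by simpa using e) : ¬ (k == out) = true)]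
        · rw [PySem.Dict.getD_insert]
          by_cases hko : k = out
          · simp [hko, hg1, hgo]
          · simp [hko, hg1, hg k hk]
        · have hupd := satLen_update thr.items (by rwa [PySem.Dict.keys] at thrnd)
            out (thr.getD out 0) hmemi (fun k => wcnt discount m k) g1
            (fun k hk => by simp [hg1, hk])
          rw [hn, hupd, hgo]
          have hbeta : (fun k => wcnt discount m k) out = wcnt discount m out := rfl
          rw [hbeta]
          have : g1 out = wcnt discount m out - 1 := by simp [hg1]
          rw [this]
          by_cases he : wcnt discount m out = thr.getD out 0
          · rw [if_pos (beq_iff_eq.mpr he)]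
            split_ifs <;> omega
          · rw [if_neg (by simpa using he)]
            split_ifs <;> omega
      · have hnout : out ∉ thr.keys := fun hmm => hout ((PySem.Dict.contains_iff_mem_keys _ _).mpr hmm)
        rw [hp1, hc out, if_neg hout]
        refine ⟨hc, fun k hk => ?_, ?_⟩
        · have hko : k ≠ out := fun e => hnout (e ▸ hk)
          simp [hg1, hko, hg k hk]
        · rw [hn]
          refine (satLen_congr _ _ _ (fun p hp => ?_)).symm
          have hpo : p.1 ≠ out := by
            intro e
            have : p.1 ∈ thr.keys := by
              rw [PySem.Dict.keys]
              exact List.mem_map_of_mem hp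
            exact hnout (e ▸ this)
          simp [hg1, hpo]
    -- invariants after admitting day j+9
    have hinv2 : (∀ k, p2.1.contains k = thr.contains k)
        ∧ (∀ k ∈ thr.keys, p2.1.getD k 0 = g2 k) ∧ p2.2 = satLen thr.items g2 := by
      obtain ⟨hc1, hg1v, hn1⟩ := hinv1
      by_cases hin : thr.contains inI = true
      · have hmemo : inI ∈ thr.keys := (PySem.Dict.contains_iff_mem_keys _ _).mp hin
        have hmemi : (inI, thr.getD inI 0) ∈ thr.items := by
          rw [PySem.Dict.items_eq_map_keys thr thrnd 0]
          exact List.mem_map_of_mem hmemo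
        have hgo : p1.1.getD inI 0 = g1 inI := hg1v inI hmemo
        rw [hp2, hc1 inI, if_pos hin]
        refine ⟨fun k => ?_, fun k hk => ?_, ?_⟩
        · rw [PySem.Dict.contains_insert]
          by_cases hk : k = inI
          · simp [hk, hin]
          · simp [hk, hc1 k, (by exact fun e => hk (by simpa using e) : ¬ (k == inI) = true)]
        · rw [PySem.Dict.getD_insert]
          by_cases hki : k = inI
          · simp [hki, hg2, hgo]
          · simp [hki, hg2, hg1v k hk]
        · have hupd := satLen_update thr.items (by rwa [PySem.Dict.keys] at thrnd)
            inI (thr.getD inI 0) hmemi g1 g2 (fun k hk => by simp [hg2, hk])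
          rw [hn1, hupd, hgo]
          have : g2 inI = g1 inI + 1 := by simp [hg2]
          rw [this]
          by_cases he : g1 inI + 1 = thr.getD inI 0
          · rw [if_pos (beq_iff_eq.mpr he)]
            split_ifs <;> omega
          · rw [if_neg (by simpa using he)]
            split_ifs <;> omega
      · have hnin : inI ∉ thr.keys := fun hmm => hin ((PySem.Dict.contains_iff_mem_keys _ _).mpr hmm)
        rw [hp2, hc1 inI, if_neg hin]
        refine ⟨hc1, fun k hk => ?_, ?_⟩
        · have hki : k ≠ inI := fun e => hnin (e ▸ hk)
          simp [hg2, hki, hg1v k hk]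
        · rw [hn1]
          refine (satLen_congr _ _ _ (fun p hp => ?_)).symm
          have hpi : p.1 ≠ inI := by
            intro e
            have : p.1 ∈ thr.keys := by
              rw [PySem.Dict.keys]
              exact List.mem_map_of_mem hp
            exact hnin (e ▸ this)
          simp [hg2, hpi]
    -- the new counts are the next window's counts
    have hg2w : ∀ k, g2 k = wcnt discount (m + 1) k := by
      intro k
      rw [wcnt_succ discount m hm11 k, ← hprev, ← hnxt]
      by_cases h2 : k = inI <;> by_cases h3 : k = out
      · rw [← h2, ← h3]
        simp [hg2, hg1, ← h2, ← h3]
      · rw [← h2]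
        have h3' : ¬ out = k := fun hh => h3 hh.symm
        simp [hg2, hg1, h3, h3', ← h2]
      · rw [← h3]
        have h2' : ¬ inI = k := fun hh => h2 hh.symm
        simp [hg2, hg1, h2, h2', ← h3]
      · have h2' : ¬ inI = k := fun hh => h2 hh.symm
        have h3' : ¬ out = k := fun hh => h3 hh.symm
        simp [hg2, hg1, h2, h3, h2', h3']
    obtain ⟨hc2, hg2v, hn2⟩ := hinv2
    have hmj1 : ((j + 1 : Int) - 1).toNat = m + 1 := by omega
    have hrec := ih (j + 1) p2.1 p2.2 (res + (if p2.2 == (thr.size : Int) then 1 else 0))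
      (by omega) (by omega)
      hc2
      (fun k hk => by rw [hg2v k hk, hg2w k, hmj1])
      (by
        rw [hn2, hmj1]
        exact satLen_congr _ _ _ (fun p _ => hg2w p.1))
    rw [hb, hrec]
    have hhit : (p2.2 == (thr.size : Int))
        = need.items.all (fun p => decide (wcnt discount j.toNat p.1 ≥ max p.2 1)) := by
      rw [hn2]
      have : satLen thr.items g2 = satLen thr.items (fun k => wcnt discount j.toNat k) := by
        refine satLen_congr _ _ _ (fun p _ => ?_)
        rw [hg2w p.1]
        congr 1
        omega
      rw [this]
      exact sat_eq_target need thr hitems _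
    rw [hhit]
    by_cases hcond : need.items.all (fun p => decide (wcnt discount j.toNat p.1 ≥ max p.2 1)) = true
    · rw [if_pos hcond, if_pos hcond]
    · rw [if_neg hcond, if_neg hcond]
      ring_nf

-- A's sliding loop accumulates exactly the same per-window hits
theorem loopA_eq (need : PySem.Dict String Int) (hnd : need.keys.Nodup)
    (discount : List String) (_hL : 10 ≤ discount.length) :
    ∀ (n : Nat) (j : Int) (d : PySem.Dict String Int) (r : Int),
      1 ≤ j → j = (discount.length : Int) - 9 - n →
      (∀ k, d.getD k 0 = wcnt discount (j - 1).toNat k) →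
      ((PySem.List.pyRange j ((discount.length : Int) - 9) 1).foldl
          (fun (st : PySem.Dict String Int × Int) i =>
            let prev := PySem.List.pyGetD discount (i - 1) ""
            let d1 := st.1.insert prev (st.1.getD prev 0 - 1)
            let nxt := PySem.List.pyGetD discount (i + 9) ""
            let d2 := d1.insert nxt (d1.getD nxt 0 + 1)
            let d3 := if d2.getD prev 0 == 0 then d2.erase prev else d2
            (d3, st.2 + containsPy need d3)) (d, r)).2
      = (PySem.List.pyRange j ((discount.length : Int) - 9) 1).foldl
          (fun r i => if need.items.all (fun p => decide (wcnt discount i.toNat p.1 ≥ max p.2 1))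
                      then r + 1 else r) r := by
  intro n
  induction n with
  | zero =>
    intro j d r hj1 hjn hd
    rw [PySem.List.pyRange_one_eq_nil (by omega)]
    rfl
  | succ n ih =>
    intro j d r hj1 hjn hd
    have hjlt : j < (discount.length : Int) - 9 := by omega
    rw [PySem.List.pyRange_one_cons hjlt]
    simp only [List.foldl_cons]
    set m : Nat := (j - 1).toNat with hm
    have hm11 : m + 11 ≤ discount.length := by omega
    have hprev : PySem.List.pyGetD discount (j - 1) "" = discount[m]'(by omega) := by
      rw [PySem.List.pyGetD_eq_getElem discount "" (by omega) (by omega)]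
    have hnxt : PySem.List.pyGetD discount (j + 9) "" = discount[m + 10]'(by omega) := by
      rw [PySem.List.pyGetD_eq_getElem discount "" (by omega) (by omega)]
      congr 1
      omega
    set prev := PySem.List.pyGetD discount (j - 1) "" with hprevdef
    set nxt := PySem.List.pyGetD discount (j + 9) "" with hnxtdef
    set d1 : PySem.Dict String Int := d.insert prev (d.getD prev 0 - 1) with hd1
    set d2 : PySem.Dict String Int := d1.insert nxt (d1.getD nxt 0 + 1) with hd2
    have hd0 : ∀ k, d.getD k 0 = wcnt discount m k := by
      intro k; rw [hd k]
    have hd2v : ∀ k, d2.getD k 0 = wcnt discount (m + 1) k := by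
      intro k
      rw [wcnt_succ discount m hm11 k, ← hprev, ← hnxt, hd2, hd1]
      simp only [PySem.Dict.getD_insert, hd0]
      by_cases h2 : k = nxt <;> by_cases h3 : k = prev
      · rw [← h2, ← h3]
        simp
      · rw [← h2]
        have h3' : ¬ prev = k := fun hh => h3 hh.symm
        simp [h3, h3']
      · rw [← h3]
        have h2' : ¬ nxt = k := fun hh => h2 hh.symm
        simp [h2, h2']
      · have h2' : ¬ nxt = k := fun hh => h2 hh.symm
        have h3' : ¬ prev = k := fun hh => h3 hh.symm
        simp [h2, h3, h2', h3']
    have hd3v : ∀ k, (if (d2.getD prev 0 == 0) = true then d2.erase prev else d2).getD k 0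
        = wcnt discount (m + 1) k := by
      intro k
      by_cases hz : (d2.getD prev 0 == 0) = true
      · rw [if_pos hz]
        by_cases hk : k = prev
        · subst hk
          rw [getD_erase_self]
          have := hd2v prev
          rw [beq_iff_eq] at hz
          omega
        · rw [getD_erase_of_ne d2 prev k hk, hd2v]
      · rw [if_neg hz, hd2v]
    set d3 : PySem.Dict String Int := if (d2.getD prev 0 == 0) = true then d2.erase prev else d2 with hd3
    have hcont : containsPy need d3 =
        if (need.items.all fun p => decide (wcnt discount j.toNat p.1 ≥ max p.2 1)) = true
        then 1 else 0 := by
      rw [containsPy_eq_all need d3 hnd (fun k => by rw [hd3v k]; exact wcnt_nonneg discount (m+1) k)]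
      have hball : (need.items.all fun p => decide (d3.getD p.1 0 ≥ max p.2 1))
          = (need.items.all fun p => decide (wcnt discount j.toNat p.1 ≥ max p.2 1)) := by
        refine List.all_congr rfl ?_
        intro p
        rw [hd3v p.1]
        have : j.toNat = m + 1 := by omega
        rw [this]
      rw [hball]
    have hstep : ∀ res : Int,
        res + containsPy need d3 =
        (if (need.items.all fun p => decide (wcnt discount j.toNat p.1 ≥ max p.2 1)) = true
         then res + 1 else res) := by
      intro res
      rw [hcont]
      by_cases hcnd : (need.items.all fun p => decide (wcnt discount j.toNat p.1 ≥ max p.2 1)) = true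
      · rw [if_pos hcnd, if_pos hcnd]
      · rw [if_neg hcnd, if_neg hcnd]; ring
    have hrec := ih (j + 1) d3 (r + containsPy need d3) (by omega) (by omega)
      (fun k => by rw [hd3v k]; congr 1; omega)
    simp only at hrec ⊢
    rw [hrec, hstep r]

-- ===== VERDICT (by name: the statement is the Claim_ definition above) =====
theorem solution_spec : Claim_equal_solution := by
  intro want number discount _ hpre
  obtain ⟨hwn, hdl⟩ := hpre
  unfold Spec_solution
  simp only [solution, solution_alt]
  rw [need_eq want number]
  set need : PySem.Dict String Int := (PySem.List.pyRange 0 (want.length : Int) 1).foldl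
    (fun d i => d.insert (PySem.List.pyGetD want i "")
        (d.getD (PySem.List.pyGetD want i "") 0 + PySem.List.pyGetD number i 0))
    PySem.Dict.empty with hneed
  set d0 : PySem.Dict String Int := (PySem.List.pyRange 0 10 1).foldl
    (fun d i => d.insert (PySem.List.pyGetD discount i "")
        (d.getD (PySem.List.pyGetD discount i "") 0 + 1))
    PySem.Dict.empty with hd0def
  have hnd : need.keys.Nodup := by
    rw [hneed]
    exact PySem.Dict.nodup_keys_foldl_insert_key (PySem.List.pyRange 0 (want.length : Int) 1)
      (fun i => PySem.List.pyGetD want i "")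
      (fun d i => d.getD (PySem.List.pyGetD want i "") 0 + PySem.List.pyGetD number i 0)
      PySem.Dict.empty (by simp [PySem.Dict.keys_empty])
  -- B's threshold dict
  set thr : PySem.Dict String Int :=
    need.items.foldl (fun d p => d.insert p.1 (max p.2 1)) PySem.Dict.empty with hthr
  have hitems : thr.items = need.items.map (fun p => (p.1, max p.2 1)) := by
    rw [hthr]
    have := PySem.Dict.items_foldl_insert_fresh (l := need.items)
      (k := fun p => p.1) (v := fun p => max p.2 1) (d := PySem.Dict.empty)
      (fun a _ => by simp [PySem.Dict.contains_empty])
      (by rw [← PySem.Dict.keys]; exact hnd)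
    simpa using this
  have hthrkeys : thr.keys = need.keys := by
    rw [PySem.Dict.keys, hitems, List.map_map, PySem.Dict.keys]
    rfl
  have thrnd : thr.keys.Nodup := by rw [hthrkeys]; exact hnd
  -- cnt = {item: 0 for item in thr}
  set cnt0 : PySem.Dict String Int :=
    thr.keys.foldl (fun d k => d.insert k 0) PySem.Dict.empty with hcnt0
  have hcnt0items : cnt0.items = thr.keys.map (fun k => (k, (0 : Int))) := by
    rw [hcnt0]
    have := PySem.Dict.items_foldl_insert_fresh (l := thr.keys)
      (k := fun k => k) (v := fun _ => (0 : Int)) (d := PySem.Dict.empty)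
      (fun a _ => by simp [PySem.Dict.contains_empty])
      (by simpa using thrnd)
    simpa using this
  have hcnt0keys : cnt0.keys = thr.keys := by
    rw [PySem.Dict.keys, hcnt0items, List.map_map]
    simp [Function.comp_def]
  have hc0 : ∀ k, cnt0.contains k = thr.contains k := by
    intro k
    rw [PySem.Dict.contains_eq_decide_mem_keys, PySem.Dict.contains_eq_decide_mem_keys, hcnt0keys]
  have hg0 : ∀ k ∈ thr.keys, cnt0.getD k 0 = 0 := by
    intro k hk
    have hmem : (k, (0 : Int)) ∈ cnt0.items := by
      rw [hcnt0items]
      exact List.mem_map_of_mem hk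
    exact PySem.Dict.getD_of_mem_items cnt0 hmem (by rw [hcnt0keys]; exact thrnd) 0
  have hsat0 : satLen thr.items (fun _ => (0 : Int)) = 0 := by
    unfold satLen
    have : thr.items.countP (fun p => decide ((0 : Int) ≥ p.2)) = 0 := by
      rw [List.countP_eq_zero]
      intro p hp
      rw [hitems] at hp
      obtain ⟨q, _, rfl⟩ := List.mem_map.mp hp
      have : ¬ ((0:Int) ≥ max q.2 1) := by omega
      simpa using this
    rw [this]
    rfl
  -- the first window, B side
  have hfold10 : (PySem.List.pyRange 0 10 1).foldl
      (fun st day => bCount thr st (PySem.List.pyGetD discount day "")) (cnt0, (0 : Int))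
      = (discount.take 10).foldl (bCount thr) (cnt0, (0 : Int)) := by
    rw [← map_pyRange10 discount hdl, List.foldl_map]
  have hinit := loopB_init thr thrnd (discount.take 10) cnt0 0 (fun _ => 0) hc0 hg0 hsat0.symm
  have hwcnt0 : ∀ k, (0 : Int) + ((discount.take 10).count k : Int) = wcnt discount 0 k := by
    intro k
    simp [wcnt]
  -- A's first window value
  have hd0v : ∀ k, d0.getD k 0 = wcnt discount 0 k := fun k => d0_getD discount hdl k
  have hmainA := loopA_eq need hnd discount hdl (discount.length - 10) 1 d0
    (containsPy need d0) (by omega) (by omega)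
    (fun k => by simpa using hd0v k)
  rw [hmainA]
  -- B side: rewrite the init fold and run the main loop
  rw [hfold10]
  set st0 := (discount.take 10).foldl (bCount thr) (cnt0, (0 : Int)) with hst0
  have hst0c : ∀ k, st0.1.contains k = thr.contains k := hinit.1
  have hst0g : ∀ k ∈ thr.keys, st0.1.getD k 0 = wcnt discount 0 k := by
    intro k hk
    rw [hinit.2.1 k hk, hwcnt0 k]
  have hst0n : st0.2 = satLen thr.items (fun k => wcnt discount 0 k) := by
    rw [hinit.2.2]
    exact satLen_congr _ _ _ (fun p _ => hwcnt0 p.1)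
  have hmainB := loopB_main need thr thrnd hitems discount hdl (discount.length - 10) 1
    st0.1 st0.2 (if st0.2 == ((thr.size : Int)) then 1 else 0) (by omega) (by omega)
    hst0c
    (fun k hk => by simpa using hst0g k hk)
    (by
      rw [hst0n]
      exact satLen_congr _ _ _ (fun p _ => by norm_num)
    )
  rw [hmainB]
  -- the two initial window verdicts agree
  have hhit0 : (st0.2 == ((thr.size : Int)))
      = need.items.all (fun p => decide (wcnt discount 0 p.1 ≥ max p.2 1)) := by
    rw [hst0n]
    exact sat_eq_target need thr hitems _
  have hinitA : containsPy need d0 =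
      (if (need.items.all fun p => decide (wcnt discount 0 p.1 ≥ max p.2 1)) = true
       then (1 : Int) else 0) := by
    rw [containsPy_eq_all need d0 hnd (fun k => by rw [hd0v k]; exact wcnt_nonneg discount 0 k)]
    have hball : (need.items.all fun p => decide (d0.getD p.1 0 ≥ max p.2 1))
        = (need.items.all fun p => decide (wcnt discount 0 p.1 ≥ max p.2 1)) := by
      refine List.all_congr rfl ?_
      intro p
      rw [hd0v p.1]
    rw [hball]
  rw [hinitA, hhit0]
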